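-- pv_equiv track=rewrite | github.com/fwilleke80/playfullanguage | lib/langlib.py | iterate_letters_with_clusters
-- ===== SOURCE A (Python) =====
-- DEFAULT_CONSONANT_CLUSTERS = {"sh", "ch", "th", "ph", "wh", "ck", "sch"}
--
-- DEFAULT_VOWEL_CLUSTERS = {"oo", "ee", "ea", "au", "eu"}
--
-- def iterate_letters_with_clusters(input_string: str, cluster_list: list[str] = DEFAULT_CONSONANT_CLUSTERS | DEFAULT_VOWEL_CLUSTERS):
--     """! This generator yields the letters of a string, but considers clusters that are "spoken as one sound".
--     For example, "school" will yield "sch" as a cluster. "Peanut" will yield "ea" as a cluster.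
--     It is recommended to use this function instead of naively iterating over the chars in a string.
--     """
--     i = 0
--     while i < len(input_string):
--         # Check for the longest matching consonant cluster
--         match = None
--         for length in range(3, 0, -1):  # Check clusters of length 3, 2, and 1
--             if i + length <= len(input_string) and input_string[i:i+length] in cluster_list:
--                 match = input_string[i:i+length]
--                 break
--         if match:
--             yield match
--             i += len(match)
--         else:
--             yield input_string[i]
--             i += 1
-- ===== SOURCE B (Python) =====
-- DEFAULT_CONSONANT_CLUSTERS = {"sh", "ch", "th", "ph", "wh", "ck", "sch"}
--
-- DEFAULT_VOWEL_CLUSTERS = {"oo", "ee", "ea", "au", "eu"}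
--
--
-- def iterate_letters_with_clusters(input_string: str, cluster_list: list[str] = DEFAULT_CONSONANT_CLUSTERS | DEFAULT_VOWEL_CLUSTERS):
--     """Yield letters of input_string, treating known clusters (length 1..3) as units.
--
--     Instead of counting candidate lengths down at every position, build ONE
--     priority list up front: the eligible clusters sorted longest-first (like a
--     regex alternation ordered so that the longest match wins).  At each
--     position the first candidate that is a prefix of the rest of the string is
--     the answer; if none matches, the single character is yielded.
--     """
--     candidates = sorted((c for c in cluster_list if 1 <= len(c) <= 3),
--                         key=len, reverse=True)
--     i = 0
--     n = len(input_string)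
--     while i < n:
--         for c in candidates:
--             if input_string.startswith(c, i):
--                 yield c
--                 i += len(c)
--                 break
--         else:
--             yield input_string[i]
--             i += 1
-- ===== Notes on version B (the rewrite author's own statement) =====
-- stated objective: alternative
-- what changed: B precomputes one priority list (eligible clusters of length 1..3, stably sorted longest-first, like an ordered regex alternation) and at each position emits the first candidate that is a prefix of the remaining string, replacing A's per-position length-countdown with slice-membership tests by a single first-match scan over the prepared candidate list.
import Mathlib
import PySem

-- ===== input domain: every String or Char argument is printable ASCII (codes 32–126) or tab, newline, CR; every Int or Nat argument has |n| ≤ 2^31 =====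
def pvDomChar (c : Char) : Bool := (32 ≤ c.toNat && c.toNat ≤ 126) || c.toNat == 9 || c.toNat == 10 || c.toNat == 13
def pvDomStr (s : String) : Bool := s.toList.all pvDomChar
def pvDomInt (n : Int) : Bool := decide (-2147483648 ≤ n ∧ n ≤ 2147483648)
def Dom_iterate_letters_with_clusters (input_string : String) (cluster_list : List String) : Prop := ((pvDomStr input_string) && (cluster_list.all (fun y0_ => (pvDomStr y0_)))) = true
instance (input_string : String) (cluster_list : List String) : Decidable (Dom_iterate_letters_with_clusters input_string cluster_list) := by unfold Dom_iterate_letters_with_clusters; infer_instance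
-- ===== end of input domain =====

-- B replaces A's per-position length countdown by one precomputed longest-first
-- candidate list scanned for the first prefix match (objective: alternative; same cost class).

-- ===== PORT A =====
-- A's while-loop over the index i; the inner 'for length in range(3, 0, -1)' with its
-- break is unrolled into the three guards in the same order.  The slice
-- input_string[i:i+length] is ported as (cs.drop i).take length, which is exactly
-- PySem.List.slice cs (some i) (some (i+length)) for Nat bounds.
def iterLoopA (cs : List Char) (cl : List String) (i : Nat) : List String :=
  if h : i < cs.length then
    if i + 3 ≤ cs.length ∧ String.ofList ((cs.drop i).take 3) ∈ cl then
      String.ofList ((cs.drop i).take 3) :: iterLoopA cs cl (i + 3)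
    else if i + 2 ≤ cs.length ∧ String.ofList ((cs.drop i).take 2) ∈ cl then
      String.ofList ((cs.drop i).take 2) :: iterLoopA cs cl (i + 2)
    else if i + 1 ≤ cs.length ∧ String.ofList ((cs.drop i).take 1) ∈ cl then
      String.ofList ((cs.drop i).take 1) :: iterLoopA cs cl (i + 1)
    else
      String.singleton cs[i] :: iterLoopA cs cl (i + 1)
  else []
termination_by cs.length - i
decreasing_by all_goals omega

def iterate_letters_with_clusters (input_string : String) (cluster_list : List String) : List String :=
  iterLoopA input_string.toList cluster_list 0

-- ===== PORT B =====
-- sorted((c for c in cluster_list if 1 <= len(c) <= 3), key=len, reverse=True)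
def pvCandidates (cluster_list : List String) : List String :=
  PySem.List.sorted
    (cluster_list.filter (fun c => decide (1 ≤ PySem.Str.len c ∧ PySem.Str.len c ≤ 3)))
    (fun c => PySem.Str.len c) true

-- every candidate is non-empty (the filter keeps 1 ≤ len); the loop cites this for termination
lemma pvCandidates_ne_nil (cluster_list : List String) :
    ∀ c ∈ pvCandidates cluster_list, c.toList ≠ [] := by
  intro c hc
  rw [pvCandidates, PySem.List.mem_sorted, List.mem_filter] at hc
  have := hc.2
  simp only [PySem.Str.len_eq, decide_eq_true_eq] at this
  intro hnil
  rw [hnil] at this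
  simp at this

-- B's while-loop: scan the priority list for the first candidate that is a prefix of
-- the rest of the string (input_string.startswith(c, i) is exactly
-- 'PySem.Chars.startswith (cs.drop i) c.toList' for 0 ≤ i); else yield one char.
def iterLoopB (cand : List String) (hc : ∀ c ∈ cand, c.toList ≠ []) (cs : List Char) (i : Nat) : List String :=
  if h : i < cs.length then
    match hf : cand.find? (fun c => PySem.Chars.startswith (cs.drop i) c.toList) with
    | some c => c :: iterLoopB cand hc cs (i + c.toList.length)
    | none => String.singleton cs[i] :: iterLoopB cand hc cs (i + 1)
  else []
termination_by cs.length - i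
decreasing_by
  · have h1 : c.toList ≠ [] := hc c (List.mem_of_find?_eq_some hf)
    have h2 : 0 < c.toList.length := List.length_pos_iff.mpr h1
    omega
  · omega

def iterate_letters_with_clusters_alt (input_string : String) (cluster_list : List String) : List String :=
  iterLoopB (pvCandidates cluster_list) (pvCandidates_ne_nil cluster_list) input_string.toList 0

-- ===== PRECONDITION & SPEC =====
def Spec_iterate_letters_with_clusters (input_string : String) (cluster_list : List String) (out : List String) : Prop := out = iterate_letters_with_clusters_alt input_string cluster_list
instance (input_string : String) (cluster_list : List String) (out : List String) : Decidable (Spec_iterate_letters_with_clusters input_string cluster_list out) := by unfold Spec_iterate_letters_with_clusters; infer_instance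

-- ===== CLAIM (what is proved, stated in full; the proofs are below) =====
def Claim_equal_iterate_letters_with_clusters : Prop := ∀ (input_string : String) (cluster_list : List String), Dom_iterate_letters_with_clusters input_string cluster_list → Spec_iterate_letters_with_clusters input_string cluster_list (iterate_letters_with_clusters input_string cluster_list)

-- ===== LEMMAS AND PROOFS =====

-- membership in the candidate list
lemma mem_pvCandidates (cl : List String) (c : String) :
    c ∈ pvCandidates cl ↔ c ∈ cl ∧ 1 ≤ c.toList.length ∧ c.toList.length ≤ 3 := by
  rw [pvCandidates, PySem.List.mem_sorted, List.mem_filter]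
  simp only [PySem.Str.len_eq, decide_eq_true_eq]
  constructor
  · rintro ⟨h1, h2, h3⟩; exact ⟨h1, by exact_mod_cast h2, by exact_mod_cast h3⟩
  · rintro ⟨h1, h2, h3⟩; exact ⟨h1, by exact_mod_cast h2, by exact_mod_cast h3⟩

-- a matching candidate IS the corresponding take
lemma prefix_eq_take {d : String} {R : List Char}
    (h : PySem.Chars.startswith R d.toList = true) :
    d.toList = R.take d.toList.length ∧ d.toList.length ≤ R.length := by
  have hp : d.toList <+: R := (PySem.Chars.startswith_iff R d.toList).mp h
  exact ⟨List.prefix_iff_eq_take.mp hp, hp.length_le⟩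

lemma startswith_take (R : List Char) (L : Nat) :
    PySem.Chars.startswith R ((String.ofList (R.take L)).toList) = true := by
  rw [String.toList_ofList, PySem.Chars.startswith_iff]
  exact List.take_prefix L R

-- the find? on the longest-first candidate list returns exactly A's longest match
lemma findP_longest (cl : List String) (R : List Char) :
    ∀ (cand : List String),
      (∀ c ∈ cand, c ∈ cl ∧ 1 ≤ c.toList.length ∧ c.toList.length ≤ 3) →
      cand.Pairwise (fun a b => b.toList.length ≤ a.toList.length) →
      ∀ L : Nat, 1 ≤ L → L ≤ 3 →
      (∀ L' : Nat, L < L' → L' ≤ 3 → ¬ (L' ≤ R.length ∧ String.ofList (R.take L') ∈ cl)) →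
      String.ofList (R.take L) ∈ cand → L ≤ R.length →
      cand.find? (fun c => PySem.Chars.startswith R c.toList) = some (String.ofList (R.take L)) := by
  intro cand
  induction cand with
  | nil => intro _ _ L _ _ _ hin _; cases hin
  | cons d t ih =>
      intro hmem hpw L hL1 hL3 hno hin hRL
      have hlenTake : (String.ofList (R.take L)).toList.length = L := by
        rw [String.toList_ofList, List.length_take]; omega
      by_cases hd : PySem.Chars.startswith R d.toList = true
      · rw [List.find?_cons_of_pos (p := fun c => PySem.Chars.startswith R c.toList) (l := t) hd]
        have hpe := prefix_eq_take hd
        have hdeq := hpe.1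
        have hdle := hpe.2
        have hdmem := hmem d (List.mem_cons_self ..)
        by_cases hEq : d.toList.length = L
        · have : d = String.ofList (R.take L) := by
            have h2 := hdeq; rw [hEq] at h2
            calc d = String.ofList d.toList := (String.ofList_toList).symm
              _ = String.ofList (R.take L) := by rw [h2]
          rw [this]
        · exfalso
          by_cases hgt : L < d.toList.length
          · exact hno d.toList.length hgt hdmem.2.2
              ⟨hdle, by rw [← hdeq, String.ofList_toList]; exact hdmem.1⟩
          · have hlt : d.toList.length < L := by omega
            rcases List.mem_cons.mp hin with h | h
            · rw [h] at hlenTake; omega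
            · have := (List.pairwise_cons.mp hpw).1 _ h
              rw [hlenTake] at this; omega
      · rw [List.find?_cons_of_neg (p := fun c => PySem.Chars.startswith R c.toList) (l := t) hd]
        have hne : String.ofList (R.take L) ≠ d := by
          intro h; rw [← h] at hd; exact hd (startswith_take R L)
        have hin' : String.ofList (R.take L) ∈ t := by
          rcases List.mem_cons.mp hin with h | h
          · exact absurd h hne
          · exact h
        exact ih (fun c hc => hmem c (List.mem_cons_of_mem _ hc))
          (List.pairwise_cons.mp hpw).2 L hL1 hL3 hno hin' hRL

-- and returns none when A has no match at all
lemma findP_none (cl : List String) (R : List Char) :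
    ∀ (cand : List String),
      (∀ c ∈ cand, c ∈ cl ∧ 1 ≤ c.toList.length ∧ c.toList.length ≤ 3) →
      (∀ L : Nat, 1 ≤ L → L ≤ 3 → ¬ (L ≤ R.length ∧ String.ofList (R.take L) ∈ cl)) →
      cand.find? (fun c => PySem.Chars.startswith R c.toList) = none := by
  intro cand
  induction cand with
  | nil => intro _ _; rfl
  | cons d t ih =>
      intro hmem hno
      have hd : ¬ PySem.Chars.startswith R d.toList = true := by
        intro hd
        have hpe := prefix_eq_take hd
        have hdmem := hmem d (List.mem_cons_self ..)
        exact hno d.toList.length hdmem.2.1 hdmem.2.2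
          ⟨hpe.2, by rw [← hpe.1, String.ofList_toList]; exact hdmem.1⟩
      rw [List.find?_cons_of_neg (p := fun c => PySem.Chars.startswith R c.toList) (l := t) hd]
      exact ih (fun c hc => hmem c (List.mem_cons_of_mem _ hc)) hno

lemma iterLoop_eq (cl : List String) (cs : List Char) :
    ∀ n i, cs.length - i ≤ n →
      iterLoopA cs cl i = iterLoopB (pvCandidates cl) (pvCandidates_ne_nil cl) cs i := by
  have hmem : ∀ c ∈ pvCandidates cl, c ∈ cl ∧ 1 ≤ c.toList.length ∧ c.toList.length ≤ 3 :=
    fun c hc => (mem_pvCandidates cl c).mp hc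
  have hpw : (pvCandidates cl).Pairwise (fun a b => b.toList.length ≤ a.toList.length) := by
    unfold pvCandidates
    refine (PySem.List.sorted_pairwise_rev _ _).imp ?_
    intro a b h
    simp only [PySem.Str.len_eq] at h
    exact_mod_cast h
  intro n
  induction n with
  | zero =>
      intro i hi
      rw [iterLoopA, iterLoopB]
      rw [dif_neg (by omega), dif_neg (by omega)]
  | succ n ih =>
      intro i hi
      by_cases h : i < cs.length
      · rw [iterLoopA, iterLoopB, dif_pos h, dif_pos h]
        set R := cs.drop i with hR
        have hRlen : R.length = cs.length - i := by rw [hR, List.length_drop]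
        have hmemTake : ∀ L : Nat, i + L ≤ cs.length → String.ofList (R.take L) ∈ cl →
            1 ≤ L → L ≤ 3 → String.ofList (R.take L) ∈ pvCandidates cl := by
          intro L hb hm h1 h3
          rw [mem_pvCandidates]
          refine ⟨hm, ?_, ?_⟩ <;> rw [String.toList_ofList, List.length_take] <;> omega
        have htakeLen : ∀ L : Nat, i + L ≤ cs.length →
            (String.ofList (R.take L)).toList.length = L := by
          intro L hb; rw [String.toList_ofList, List.length_take]; omega
        by_cases m3 : i + 3 ≤ cs.length ∧ String.ofList (R.take 3) ∈ cl
        · rw [if_pos m3]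
          have hno : ∀ L' : Nat, 3 < L' → L' ≤ 3 → ¬ (L' ≤ R.length ∧ String.ofList (R.take L') ∈ cl) :=
            fun L' hlt hle => absurd hle (by omega)
          rw [findP_longest cl R (pvCandidates cl) hmem hpw 3 (by omega) (by omega) hno
            (hmemTake 3 m3.1 m3.2 (by omega) (by omega)) (by omega)]
          show String.ofList (R.take 3) :: iterLoopA cs cl (i + 3) =
            String.ofList (R.take 3) ::
              iterLoopB (pvCandidates cl) (pvCandidates_ne_nil cl) cs
                (i + (String.ofList (R.take 3)).toList.length)
          rw [htakeLen 3 m3.1]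
          exact congrArg _ (ih (i + 3) (by omega))
        · rw [if_neg m3]
          by_cases m2 : i + 2 ≤ cs.length ∧ String.ofList (R.take 2) ∈ cl
          · rw [if_pos m2]
            have hno : ∀ L' : Nat, 2 < L' → L' ≤ 3 → ¬ (L' ≤ R.length ∧ String.ofList (R.take L') ∈ cl) := by
              intro L' hlt hle hx
              have h3 : L' = 3 := by omega
              subst h3
              have hxr := hx.1
              exact m3 ⟨by omega, hx.2⟩
            rw [findP_longest cl R (pvCandidates cl) hmem hpw 2 (by omega) (by omega) hno
              (hmemTake 2 m2.1 m2.2 (by omega) (by omega)) (by omega)]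
            show String.ofList (R.take 2) :: iterLoopA cs cl (i + 2) =
              String.ofList (R.take 2) ::
                iterLoopB (pvCandidates cl) (pvCandidates_ne_nil cl) cs
                  (i + (String.ofList (R.take 2)).toList.length)
            rw [htakeLen 2 m2.1]
            exact congrArg _ (ih (i + 2) (by omega))
          · rw [if_neg m2]
            by_cases m1 : i + 1 ≤ cs.length ∧ String.ofList (R.take 1) ∈ cl
            · rw [if_pos m1]
              have hno : ∀ L' : Nat, 1 < L' → L' ≤ 3 → ¬ (L' ≤ R.length ∧ String.ofList (R.take L') ∈ cl) := by
                intro L' hlt hle hx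
                have hxr := hx.1
                interval_cases L'
                · exact m2 ⟨by omega, hx.2⟩
                · exact m3 ⟨by omega, hx.2⟩
              rw [findP_longest cl R (pvCandidates cl) hmem hpw 1 (by omega) (by omega) hno
                (hmemTake 1 m1.1 m1.2 (by omega) (by omega)) (by omega)]
              show String.ofList (R.take 1) :: iterLoopA cs cl (i + 1) =
                String.ofList (R.take 1) ::
                  iterLoopB (pvCandidates cl) (pvCandidates_ne_nil cl) cs
                    (i + (String.ofList (R.take 1)).toList.length)
              rw [htakeLen 1 m1.1]
              exact congrArg _ (ih (i + 1) (by omega))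
            · rw [if_neg m1]
              have hno : ∀ L : Nat, 1 ≤ L → L ≤ 3 →
                  ¬ (L ≤ R.length ∧ String.ofList (R.take L) ∈ cl) := by
                intro L h1 h3 hx
                have hxr := hx.1
                interval_cases L
                · exact m1 ⟨by omega, hx.2⟩
                · exact m2 ⟨by omega, hx.2⟩
                · exact m3 ⟨by omega, hx.2⟩
              rw [findP_none cl R (pvCandidates cl) hmem hno]
              exact congrArg _ (ih (i + 1) (by omega))
      · rw [iterLoopA, iterLoopB, dif_neg h, dif_neg h]

-- ===== VERDICT (by name: the statement is the Claim_ definition above) =====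
theorem iterate_letters_with_clusters_spec : Claim_equal_iterate_letters_with_clusters := by
  intro input_string cluster_list _
  unfold Spec_iterate_letters_with_clusters iterate_letters_with_clusters iterate_letters_with_clusters_alt
  exact iterLoop_eq cluster_list input_string.toList input_string.toList.length 0 (by omega)
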